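-- pv_equiv track=rewrite | github.com/isezen/air-db | airpy/_sql_helper_.py | _get_cmp_
-- ===== SOURCE A (Python) =====
-- def _get_cmp_(val):
--     """ Get comparison values as tuple """
--     ops = ('>=', '<=', '>', '<')
--     if val.startswith(ops):
--         for o in ops:
--             if val.startswith(o):
--                 cmp = o
--                 val = val[len(cmp):]
--                 break
--     else:
--         cmp = '='
--     return cmp, val
-- ===== SOURCE B (Python) =====
-- def _get_cmp_(val):
--     """ Get comparison values as tuple """
--     # B: inspect the first one/two characters directly instead of scanning a prefix tuple
--     if val[:1] in ('<', '>'):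
--         n = 2 if val[1:2] == '=' else 1
--         return val[:n], val[n:]
--     return '=', val
-- ===== Notes on version B (the rewrite author's own statement) =====
-- stated objective: simpler
-- what changed: Instead of testing the string against a tuple of operator prefixes and then looping over that tuple to find the matching one, B inspects the first character directly and checks whether the second is '=' to decide the operator length, then splits by slicing.
import Mathlib
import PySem

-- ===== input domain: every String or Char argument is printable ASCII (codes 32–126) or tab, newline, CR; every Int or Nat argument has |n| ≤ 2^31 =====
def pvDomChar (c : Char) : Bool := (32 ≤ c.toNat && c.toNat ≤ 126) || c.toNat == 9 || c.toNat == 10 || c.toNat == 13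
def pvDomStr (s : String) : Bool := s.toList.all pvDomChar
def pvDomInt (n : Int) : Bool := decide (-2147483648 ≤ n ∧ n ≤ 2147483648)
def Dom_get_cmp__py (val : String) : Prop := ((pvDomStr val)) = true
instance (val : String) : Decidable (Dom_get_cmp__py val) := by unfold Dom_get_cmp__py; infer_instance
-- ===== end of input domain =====

-- B inspects the first character and an optional following '=' directly instead of scanning a
-- tuple of operator prefixes twice (simpler decomposition; same O(1) cost).

-- ===== PORT A =====
-- A's 'for o in ops: if val.startswith(o): … break' loop; the [] case is unreachable because
-- the loop is only entered when val.startswith(ops) holds.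
def pvLoopA : List String → String → String × String
  | [], v => ("=", v)
  | o :: rest, v =>
    if PySem.Str.startswith v o then (o, PySem.Str.slice v (some (PySem.Str.len o)) none)
    else pvLoopA rest v

def pvOpsA : List String := [">=", "<=", ">", "<"]

def get_cmp__py (val : String) : String × String :=
  if pvOpsA.any (fun o => PySem.Str.startswith val o) then pvLoopA pvOpsA val
  else ("=", val)

-- ===== PORT B =====
def get_cmp__py_alt (val : String) : String × String :=
  if PySem.Str.slice val none (some 1) = "<" ∨ PySem.Str.slice val none (some 1) = ">" then
    let n : Int := if PySem.Str.slice val (some 1) (some 2) = "=" then 2 else 1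
    (PySem.Str.slice val none (some n), PySem.Str.slice val (some n) none)
  else ("=", val)

-- ===== PRECONDITION & SPEC =====
def Spec_get_cmp__py (val : String) (out : String × String) : Prop := out = get_cmp__py_alt val
instance (val : String) (out : String × String) : Decidable (Spec_get_cmp__py val out) := by unfold Spec_get_cmp__py; infer_instance

-- ===== CLAIM (what is proved, stated in full; the proofs are below) =====
def Claim_equal_get_cmp__py : Prop := ∀ (val : String), Dom_get_cmp__py val → Spec_get_cmp__py val (get_cmp__py val)

-- ===== LEMMAS AND PROOFS =====
theorem pv_key (l : List Char) :
    get_cmp__py (String.ofList l) = get_cmp__py_alt (String.ofList l) := by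
  have t1 : ∀ (L : List Char), PySem.List.slice L none (some 1) = L.take 1 :=
    fun L => PySem.List.slice_to L (by norm_num)
  have t2 : ∀ (L : List Char), PySem.List.slice L none (some 2) = L.take 2 :=
    fun L => PySem.List.slice_to L (by norm_num)
  have f1 : ∀ (L : List Char), PySem.List.slice L (some 1) none = L.drop 1 := by
    intro L; have h := PySem.List.slice_from L (a := 1) (by norm_num); simpa using h
  have f2 : ∀ (L : List Char), PySem.List.slice L (some 2) none = L.drop 2 := by
    intro L; have h := PySem.List.slice_from L (a := 2) (by norm_num); simpa using h
  have m12 : ∀ (L : List Char), PySem.List.slice L (some 1) (some 2) = (L.drop 1).take 1 := by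
    intro L; have h := PySem.List.slice_toNat L (a := 1) (b := 2) (by norm_num) (by norm_num)
    simpa using h
  have sge : String.ofList ['>', '='] = ">=" := by decide
  have sle : String.ofList ['<', '='] = "<=" := by decide
  have sg : String.ofList ['>'] = ">" := by decide
  have sl : String.ofList ['<'] = "<" := by decide
  have se : String.ofList ['='] = "=" := by decide
  match l with
  | [] => decide
  | [c] =>
    simp only [get_cmp__py, get_cmp__py_alt, pvOpsA, pvLoopA, PySem.Str.startswith_eq,
      PySem.Str.slice, PySem.Str.len, List.any_cons, List.any_nil,
      PySem.Chars.startswith, List.isPrefixOf]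
    by_cases h1 : c = '>'
    · subst h1; decide
    by_cases h2 : c = '<'
    · subst h2; decide
    · have hcl : ¬ String.ofList [c] = "<" := by
        intro h; have hl := String.ofList_inj.mp (h.trans sl.symm)
        injection hl with h4; exact h2 h4
      have hcg : ¬ String.ofList [c] = ">" := by
        intro h; have hl := String.ofList_inj.mp (h.trans sg.symm)
        injection hl with h4; exact h1 h4
      simp [t1, Ne.symm h1, Ne.symm h2, hcl, hcg]
  | c :: d :: rest =>
    simp only [get_cmp__py, get_cmp__py_alt, pvOpsA, pvLoopA, PySem.Str.startswith_eq,
      PySem.Str.slice, PySem.Str.len, List.any_cons, List.any_nil,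
      PySem.Chars.startswith, List.isPrefixOf]
    by_cases h1 : c = '>'
    · subst h1
      by_cases h3 : d = '='
      · subst h3
        simp [t1, t2, f1, f2, m12, sge, sg, String.ofList_inj]
      · have hd : ¬ String.ofList [d] = "=" := by
          intro h; have hl := String.ofList_inj.mp (h.trans se.symm)
          injection hl with h4; exact h3 h4
        simp [t1, t2, f1, f2, m12, hd, Ne.symm h3, ← sg, String.ofList_inj]
    by_cases h2 : c = '<'
    · subst h2
      by_cases h3 : d = '='
      · subst h3
        simp [t1, t2, f1, f2, m12, sle, sl, String.ofList_inj]
      · have hd : ¬ String.ofList [d] = "=" := by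
          intro h; have hl := String.ofList_inj.mp (h.trans se.symm)
          injection hl with h4; exact h3 h4
        simp [t1, t2, f1, f2, m12, hd, Ne.symm h3, ← sl, String.ofList_inj]
    · have hcl : ¬ String.ofList [c] = "<" := by
        intro h; have hl := String.ofList_inj.mp (h.trans sl.symm)
        injection hl with h4; exact h2 h4
      have hcg : ¬ String.ofList [c] = ">" := by
        intro h; have hl := String.ofList_inj.mp (h.trans sg.symm)
        injection hl with h4; exact h1 h4
      simp [t1, Ne.symm h1, Ne.symm h2, hcl, hcg]

-- ===== VERDICT (by name: the statement is the Claim_ definition above) =====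
theorem get_cmp__py_spec : Claim_equal_get_cmp__py := by
  intro val _
  unfold Spec_get_cmp__py
  simpa using pv_key val.toList
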